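-- pv_equiv track=rewrite | github.com/Duwaysan/SDA-Software-Development-Bootcamp | work/week-05/day-02/01. Recursion/recursion_k.py | coin_flips
-- ===== SOURCE A (Python) =====
-- def coin_flips(n):
-- # This function returns an array of all possible outcomes from flipping a coin N times.
-- # Input type: Integer
--     if n < 1:
--         return None
--     if n == 1:
--         return ['T', 'H']
--     new_outcomes = []
--     for flip in coin_flips(n - 1):
--         new_outcomes.append(flip + 'T')
--         new_outcomes.append(flip + 'H')
--     return new_outcomes
-- ===== SOURCE B (Python) =====
-- def coin_flips(n):
--     # Iterative accumulation instead of recursion: extend every prefix by 'T' then 'H', n times.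
--     if n < 1:
--         return None
--     outcomes = ['']
--     for _ in range(n):
--         outcomes = [o + c for o in outcomes for c in 'TH']
--     return outcomes
-- ===== Notes on version B (the rewrite author's own statement) =====
-- stated objective: simpler
-- what changed: Replaces the recursion (with its separate base case) by an iterative loop that extends a growing list of prefixes n times starting from [''].
import Mathlib
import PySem

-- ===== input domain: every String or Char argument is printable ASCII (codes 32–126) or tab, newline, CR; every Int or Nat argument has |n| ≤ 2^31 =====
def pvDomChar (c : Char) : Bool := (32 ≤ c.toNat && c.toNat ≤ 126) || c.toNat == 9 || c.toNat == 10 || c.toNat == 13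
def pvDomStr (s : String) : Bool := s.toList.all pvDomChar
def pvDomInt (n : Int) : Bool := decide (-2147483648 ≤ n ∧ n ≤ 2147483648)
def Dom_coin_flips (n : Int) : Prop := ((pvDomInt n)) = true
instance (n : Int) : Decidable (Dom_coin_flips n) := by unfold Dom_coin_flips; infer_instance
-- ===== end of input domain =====

-- B replaces A's recursion by an iterative loop extending a list of prefixes n times; same values, different decomposition.

-- ===== PORT A =====
-- literal transliteration of the recursive A; the 'none' arm of the match is unreachable (for n ≥ 2 the recursive call returns a list)
def coin_flips (n : Int) : Option (List String) :=
  if n < 1 then none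
  else if n = 1 then some ["T", "H"]
  else
    match coin_flips (n - 1) with
    | none => none
    | some prev => some (prev.foldl (fun acc flip => (acc ++ [flip ++ "T"]) ++ [flip ++ "H"]) [])
termination_by n.toNat
decreasing_by omega

-- ===== PORT B =====
def coin_flips_alt (n : Int) : Option (List String) :=
  if n < 1 then none
  else some ((List.range n.toNat).foldl
    (fun outcomes _ => outcomes.flatMap (fun o => ["T", "H"].map (fun c => o ++ c))) [""])

-- ===== PRECONDITION & SPEC =====
-- Pre_ excludes only inputs on which Python A raises: A recurses to depth n, so for n beyond
-- CPython's recursion limit it raises RecursionError before returning; Pre_ keeps every n<1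
-- (A returns None) and every n up to that limit — it excludes no input on which A returns.
def Pre_coin_flips (n : Int) : Prop := n < 1 ∨ n ≤ 990
instance (n : Int) : Decidable (Pre_coin_flips n) := by unfold Pre_coin_flips; infer_instance
def pvWitness_coin_flips : Int := (3)

def Spec_coin_flips (n : Int) (out : Option (List String)) : Prop := out = coin_flips_alt n
instance (n : Int) (out : Option (List String)) : Decidable (Spec_coin_flips n out) := by unfold Spec_coin_flips; infer_instance

-- ===== CLAIM (what is proved, stated in full; the proofs are below) =====
def Claim_equal_coin_flips : Prop := ∀ (n : Int), Dom_coin_flips n → Pre_coin_flips n → Spec_coin_flips n (coin_flips n)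

-- ===== LEMMAS AND PROOFS =====

-- A's inner append loop is a flatMap
theorem foldl_pair_append (l acc : List String) :
    l.foldl (fun acc flip => (acc ++ [flip ++ "T"]) ++ [flip ++ "H"]) acc
      = acc ++ l.flatMap (fun o => ["T", "H"].map (fun c => o ++ c)) := by
  induction l generalizing acc with
  | nil => simp
  | cons x xs ih => rw [List.foldl_cons, ih]; simp [List.flatMap]

-- one more iteration of a constant-step foldl over range, peeled from the back
theorem foldl_range_succ {α : Type} (f : α → α) (a : α) (k : Nat) :
    (List.range (k + 1)).foldl (fun x _ => f x) a
      = f ((List.range k).foldl (fun x _ => f x) a) := by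
  rw [List.range_succ, List.foldl_append]
  rfl

theorem coin_flips_pos (k : Nat) :
    coin_flips ((k : Int) + 1)
      = some ((List.range (k + 1)).foldl
          (fun outcomes _ => outcomes.flatMap (fun o => ["T", "H"].map (fun c => o ++ c))) [""]) := by
  induction k with
  | zero =>
    unfold coin_flips
    norm_num
  | succ m ih =>
    unfold coin_flips
    rw [if_neg (by omega), if_neg (by omega),
        show ((m + 1 : Nat) : Int) + 1 - 1 = (m : Int) + 1 by push_cast; ring]
    simp only [ih]
    rw [foldl_pair_append,
        foldl_range_succ (fun outcomes => outcomes.flatMap (fun o => ["T", "H"].map (fun c => o ++ c))) ([""]) (m + 1)]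
    simp

-- ===== VERDICT (by name: the statement is the Claim_ definition above) =====
theorem coin_flips_spec : Claim_equal_coin_flips := by
  intro n _ _
  unfold Spec_coin_flips coin_flips_alt
  by_cases h : n < 1
  · rw [if_pos h]
    unfold coin_flips
    rw [if_pos h]
  · rw [if_neg h]
    obtain ⟨k, hk⟩ : ∃ k : Nat, n = (k : Int) + 1 := ⟨(n - 1).toNat, by omega⟩
    subst hk
    rw [coin_flips_pos]
    congr 2
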